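-- pv_equiv track=rewrite | github.com/MichaelHeinecke/prepare-sh | src/service_dependency_mapper/main.py | map_service_dependencies
-- ===== SOURCE A (Python) =====
-- from collections import defaultdict
--
-- def map_service_dependencies(config_data: str) -> dict:
--     # Parse input: Ignore empty lines and lines starting with #
--     services_raw = [e for e in config_data.split('\n') if  e != '' and not e.startswith('#')]
--
--     # For each element, {key: {depends_on: [], required_by: []}}
--     services = defaultdict(lambda: {'depends_on': [], 'required_by': []})
--     for e in services_raw:
--         service = e.split(':')
--         key = service[0].strip()
--         values = [v.strip() for v in service[1].split(',') if v.strip()]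
--         values.sort()
--         services[key]['depends_on'].extend(values)
--         for v in values:
--             services[v]['required_by'].append(key)
--
--     # return {k: {'depends_on': sorted(v['depends_on']), 'required_by': v['required_by']} for k, v in services.items()}
--     return services
-- ===== SOURCE B (Python) =====
-- def map_service_dependencies(config_data: str) -> dict:
--     # Parse once into a list of (key, sorted values) pairs, then build the
--     # result purely: first-appearance order scan + filtering comprehensions
--     # that read the forward relation and its inverse off the parsed list.
--     parsed = []
--     for line in config_data.split('\n'):
--         if line == '' or line.startswith('#'):
--             continue
--         parts = line.split(':')
--         parsed.append((parts[0].strip(),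
--                        sorted(v.strip() for v in parts[1].split(',') if v.strip())))
--     order = []
--     for key, values in parsed:
--         for name in [key] + values:
--             if name not in order:
--                 order.append(name)
--     return {s: {'depends_on': [v for k, vals in parsed for v in vals if k == s],
--                 'required_by': [k for k, vals in parsed for v in vals if v == s]}
--             for s in order}
-- ===== Notes on version B (the rewrite author's own statement) =====
-- stated objective: alternative
-- what changed: A builds a defaultdict in one interleaved pass, mutating each value's required_by while reading lines; B first parses the lines into a (key, sorted-values) list and then constructs the result purely: a first-appearance order scan plus filtering comprehensions that read depends_on and the inverted required_by relation off the parsed list, with no mutable dict.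
import Mathlib
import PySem

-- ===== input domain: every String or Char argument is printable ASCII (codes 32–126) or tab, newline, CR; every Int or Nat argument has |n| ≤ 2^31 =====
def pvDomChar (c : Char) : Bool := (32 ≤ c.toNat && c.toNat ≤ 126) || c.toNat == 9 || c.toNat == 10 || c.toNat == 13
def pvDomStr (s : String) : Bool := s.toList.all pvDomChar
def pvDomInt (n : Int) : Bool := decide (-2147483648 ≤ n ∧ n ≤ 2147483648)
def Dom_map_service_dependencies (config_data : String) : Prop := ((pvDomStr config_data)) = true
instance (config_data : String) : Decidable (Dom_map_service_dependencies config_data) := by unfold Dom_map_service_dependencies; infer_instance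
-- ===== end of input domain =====

-- B replaces A's single interleaved defaultdict-mutating pass by a parse-once list plus a pure
-- construction (first-appearance order scan and filtering comprehensions that invert the relation);
-- alternative decomposition, not claimed faster.


-- ===== PORT A =====
-- the per-line body of A's loop; the inner dict {'depends_on': …, 'required_by': …} always has
-- exactly those two keys in that order, so it is carried as a pair and rendered as the
-- two-entry association list at return (exact)
def pvStepA (d : PySem.Dict String (List String × List String)) (e : String) :
    PySem.Dict String (List String × List String) :=
  let service := ((PySem.Str.split? e ":").getD [])
  let key := PySem.Str.strip ((PySem.List.pyGet? service 0).getD "")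
  let values := PySem.List.sorted
      (((((PySem.Str.split? ((PySem.List.pyGet? service 1).getD "") ",").getD [])).map PySem.Str.strip).filter
        (fun v => !(v == ""))) (fun v => v) false
  let p := d.getD key ([], [])
  let d1 := d.insert key (p.1 ++ values, p.2)
  values.foldl (fun d v => let q := d.getD v ([], []); d.insert v (q.1, q.2 ++ [key])) d1

def map_service_dependencies (config_data : String) : List (String × List (String × List String)) :=
  let services_raw := (((PySem.Str.split? config_data "\n").getD [])).filter
      (fun e => !(e == "") && !(PySem.Str.startswith e "#"))
  let services := services_raw.foldl pvStepA PySem.Dict.empty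
  services.items.map (fun kv => (kv.1, [("depends_on", kv.2.1), ("required_by", kv.2.2)]))

-- ===== PORT B =====
def pvParseB (line : String) : String × List String :=
  let parts := ((PySem.Str.split? line ":").getD [])
  (PySem.Str.strip ((PySem.List.pyGet? parts 0).getD ""),
   PySem.List.sorted
      (((((PySem.Str.split? ((PySem.List.pyGet? parts 1).getD "") ",").getD [])).map PySem.Str.strip).filter
        (fun v => !(v == ""))) (fun v => v) false)

def map_service_dependencies_alt (config_data : String) : List (String × List (String × List String)) :=
  let parsed := (((PySem.Str.split? config_data "\n").getD [])).foldl
      (fun acc line =>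
        if !(line == "") && !(PySem.Str.startswith line "#") then acc ++ [pvParseB line] else acc) []
  let order := parsed.foldl
      (fun ord kv => ([kv.1] ++ kv.2).foldl
        (fun o name => if o.contains name then o else o ++ [name]) ord) []
  order.map (fun s =>
    (s, [("depends_on", parsed.flatMap (fun kv => if kv.1 == s then kv.2 else [])),
         ("required_by", parsed.flatMap (fun kv => (kv.2.filter (fun v => v == s)).map (fun _ => kv.1)))]))

-- ===== PRECONDITION & SPEC =====
-- Pre_ excludes exactly the inputs where the Python A raises IndexError: a retained line
-- (one that is neither empty nor a comment) containing no key/value separator makes A's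
-- indexing of the second split field fail.  (B raises there too.)
def Pre_map_service_dependencies (config_data : String) : Prop :=
  ∀ e ∈ ((PySem.Str.split? config_data "\n").getD []),
    e = "" ∨ PySem.Str.startswith e "#" = true ∨ PySem.Str.isIn ":" e = true
instance (config_data : String) : Decidable (Pre_map_service_dependencies config_data) := by
  unfold Pre_map_service_dependencies; infer_instance
def pvWitness_map_service_dependencies : String := "web: db, cache\n#note\n\ndb:"

def Spec_map_service_dependencies (config_data : String) (out : List (String × List (String × List String))) : Prop := out = map_service_dependencies_alt config_data
instance (config_data : String) (out : List (String × List (String × List String))) : Decidable (Spec_map_service_dependencies config_data out) := by unfold Spec_map_service_dependencies; infer_instance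

-- ===== CLAIM (what is proved, stated in full; the proofs are below) =====
def Claim_equal_map_service_dependencies : Prop := ∀ (config_data : String), Dom_map_service_dependencies config_data → Pre_map_service_dependencies config_data → Spec_map_service_dependencies config_data (map_service_dependencies config_data)

-- ===== LEMMAS AND PROOFS =====

def pvAdd (o : List String) (name : String) : List String :=
  if o.contains name then o else o ++ [name]

lemma contains_mk_map {ν : Type} (keys : List String) (f : String → ν) (k : String) :
    (PySem.Dict.mk (keys.map (fun s => (s, f s)))).contains k = keys.contains k := by
  induction keys with
  | nil => rfl
  | cons a t ih =>
    simp only [PySem.Dict.contains, List.map_cons, List.any_cons] at *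
    rw [ih]
    by_cases h : a = k
    · simp [h]
    · simp [beq_false_of_ne h, Ne.symm h]

lemma items_insert_mk_map {ν : Type} (keys : List String) (f g : String → ν) (k : String)
    (hagree : ∀ s, s ≠ k → f s = g s) :
    ((PySem.Dict.mk (keys.map (fun s => (s, f s)))).insert k (g k)).items =
      (pvAdd keys k).map (fun s => (s, g s)) := by
  unfold pvAdd
  rw [PySem.Dict.insert, contains_mk_map]
  by_cases h : keys.contains k
  · simp only [h, if_true, List.map_map]
    apply List.map_congr_left
    intro s _
    by_cases hs : s = k
    · subst hs; simp
    · simp [Function.comp, beq_false_of_ne hs, hagree s hs]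
  · simp only [h, if_false, Bool.false_eq_true, List.map_append, List.map_cons]
    congr 1
    apply List.map_congr_left
    intro s hs
    have : s ≠ k := fun e => h (by simp [e ▸ hs])
    simp [hagree s this]

lemma mem_foldl_pvAdd_of_mem {o : List String} {x : String} (h : x ∈ o) (l : List String) :
    x ∈ l.foldl pvAdd o := by
  induction l generalizing o with
  | nil => exact h
  | cons a t ih =>
    apply ih
    unfold pvAdd; split
    · exact h
    · exact List.mem_append_left _ h

lemma mem_foldl_pvAdd_of_mem_list {l : List String} {x : String} (h : x ∈ l) (o : List String) :
    x ∈ l.foldl pvAdd o := by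
  induction l generalizing o with
  | nil => cases h
  | cons a t ih =>
    simp only [List.foldl_cons]
    rcases List.mem_cons.mp h with rfl | hm
    · apply mem_foldl_pvAdd_of_mem
      unfold pvAdd; split
      · next hc => exact List.contains_iff_mem.mp hc
      · exact List.mem_append_right _ (List.mem_singleton.mpr rfl)
    · exact ih hm _

def pvOrdStep (ord : List String) (kv : String × List String) : List String :=
  ([kv.1] ++ kv.2).foldl pvAdd ord

def pvOrd (ps : List (String × List String)) : List String := ps.foldl pvOrdStep []

def pvDep (ps : List (String × List String)) (s : String) : List String :=
  ps.flatMap (fun kv => if kv.1 == s then kv.2 else [])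

def pvReq (ps : List (String × List String)) (s : String) : List String :=
  ps.flatMap (fun kv => (kv.2.filter (fun v => v == s)).map (fun _ => kv.1))

lemma getD_mk_map {ν : Type} (keys : List String) (f : String → ν) (k : String) (dflt : ν) :
    (PySem.Dict.mk (keys.map (fun s => (s, f s)))).getD k dflt =
      if keys.contains k then f k else dflt := by
  induction keys with
  | nil => simp [PySem.Dict.getD, PySem.Dict.get?]
  | cons a t ih =>
    by_cases h : a = k
    · subst h; simp [PySem.Dict.getD, PySem.Dict.get?]
    · have hb : (a == k) = false := beq_false_of_ne h
      simp only [PySem.Dict.getD, PySem.Dict.get?, List.map_cons, List.find?_cons, hb,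
        List.contains_cons] at *
      rw [ih]
      simp [Ne.symm h]

lemma mem_foldl_pvOrdStep_of_mem {o : List String} {x : String} (h : x ∈ o)
    (ps : List (String × List String)) : x ∈ ps.foldl pvOrdStep o := by
  induction ps generalizing o with
  | nil => exact h
  | cons a t ih => exact ih (mem_foldl_pvAdd_of_mem h _)

lemma mem_pvOrd_of_mem {ps : List (String × List String)} {kv : String × List String}
    (h : kv ∈ ps) : kv.1 ∈ pvOrd ps ∧ ∀ v ∈ kv.2, v ∈ pvOrd ps := by
  unfold pvOrd
  generalize [] = o
  induction ps generalizing o with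
  | nil => cases h
  | cons a t ih =>
    rcases List.mem_cons.mp h with rfl | hm
    · simp only [List.foldl_cons]
      constructor
      · exact mem_foldl_pvOrdStep_of_mem
          (mem_foldl_pvAdd_of_mem_list (by simp) _) t
      · intro v hv
        exact mem_foldl_pvOrdStep_of_mem
          (mem_foldl_pvAdd_of_mem_list (by simp [hv]) _) t
    · exact ih hm _

lemma pvDep_nil {ps : List (String × List String)} {k : String} (h : k ∉ pvOrd ps) :
    pvDep ps k = [] := by
  unfold pvDep
  rw [List.flatMap_eq_nil_iff]
  intro kv hkv
  have : kv.1 ≠ k := fun e => h (e ▸ (mem_pvOrd_of_mem hkv).1)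
  simp [beq_false_of_ne this]

lemma pvReq_nil {ps : List (String × List String)} {k : String} (h : k ∉ pvOrd ps) :
    pvReq ps k = [] := by
  unfold pvReq
  rw [List.flatMap_eq_nil_iff]
  intro kv hkv
  have : ∀ v ∈ kv.2, (v == k) = false := fun v hv =>
    beq_false_of_ne (fun e => h (e ▸ (mem_pvOrd_of_mem hkv).2 v hv))
  rw [List.filter_eq_nil_iff.mpr (by intro v hv; simp [this v hv])]
  rfl

lemma not_mem_of_not_mem_pvAdd {o : List String} {name s : String}
    (h : s ∉ pvAdd o name) : s ∉ o ∧ s ≠ name := by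
  unfold pvAdd at h
  constructor
  · intro hs; apply h; split
    · exact hs
    · exact List.mem_append_left _ hs
  · rintro rfl
    apply h
    by_cases hc : o.contains s
    · simp only [hc, if_true]
      exact List.contains_iff_mem.mp hc
    · rw [if_neg hc]; simp

lemma inner_fold (k : String) (vals : List String) (keys : List String)
    (g : String → List String × List String) (hg : ∀ s, s ∉ keys → g s = ([], [])) :
    (vals.foldl (fun d v => let q := d.getD v ([], []); d.insert v (q.1, q.2 ++ [k]))
        (PySem.Dict.mk (keys.map (fun s => (s, g s))))).items =
      (vals.foldl pvAdd keys).map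
        (fun s => (s, (g s).1, (g s).2 ++ (vals.filter (fun v => v == s)).map (fun _ => k))) := by
  induction vals generalizing keys g with
  | nil =>
    simp only [List.foldl_nil, List.filter_nil, List.map_nil, List.append_nil]
  | cons v rest ih =>
    simp only [List.foldl_cons]
    have hget : (PySem.Dict.mk (keys.map (fun s => (s, g s)))).getD v ([], []) = g v := by
      rw [getD_mk_map]
      split
      · rfl
      · next hc => exact (hg v (fun hm => hc (List.contains_iff_mem.mpr hm))).symm
    rw [hget]
    set g' : String → List String × List String :=
      fun s => if s = v then ((g v).1, (g v).2 ++ [k]) else g s with hg'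
    have hins : ((PySem.Dict.mk (keys.map (fun s => (s, g s)))).insert v ((g v).1, (g v).2 ++ [k])).items
        = (pvAdd keys v).map (fun s => (s, g' s)) := by
      have := items_insert_mk_map keys g g' v (fun s hs => by simp [hg', hs])
      simpa [hg'] using this
    have hstruct : (PySem.Dict.mk (keys.map (fun s => (s, g s)))).insert v ((g v).1, (g v).2 ++ [k])
        = PySem.Dict.mk ((pvAdd keys v).map (fun s => (s, g' s))) := by
      cases hd : (PySem.Dict.mk (keys.map (fun s => (s, g s)))).insert v ((g v).1, (g v).2 ++ [k])
      simp only [PySem.Dict.mk.injEq]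
      rw [← hins, hd]
    rw [hstruct, ih (pvAdd keys v) g' (fun s hs => by
      obtain ⟨h1, h2⟩ := not_mem_of_not_mem_pvAdd hs
      simp [hg', h2, hg s h1])]
    apply List.map_congr_left
    intro s _
    by_cases hsv : s = v
    · subst hsv
      simp [hg', List.append_assoc]
    · simp [hg', hsv, beq_false_of_ne (Ne.symm hsv)]

def pvUpd (d : PySem.Dict String (List String × List String)) (kv : String × List String) :
    PySem.Dict String (List String × List String) :=
  let p := d.getD kv.1 ([], [])
  let d1 := d.insert kv.1 (p.1 ++ kv.2, p.2)
  kv.2.foldl (fun d v => let q := d.getD v ([], []); d.insert v (q.1, q.2 ++ [kv.1])) d1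

lemma pvOrd_append (ps : List (String × List String)) (x : String × List String) :
    pvOrd (ps ++ [x]) = x.2.foldl pvAdd (pvAdd (pvOrd ps) x.1) := by
  unfold pvOrd
  rw [List.foldl_append]
  rfl

lemma pvDep_append (ps : List (String × List String)) (x : String × List String) (s : String) :
    pvDep (ps ++ [x]) s = pvDep ps s ++ (if x.1 == s then x.2 else []) := by
  unfold pvDep
  simp [List.flatMap_append]

lemma pvReq_append (ps : List (String × List String)) (x : String × List String) (s : String) :
    pvReq (ps ++ [x]) s = pvReq ps s ++ (x.2.filter (fun v => v == s)).map (fun _ => x.1) := by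
  unfold pvReq
  simp [List.flatMap_append]

lemma main_invariant (ps : List (String × List String)) :
    (ps.foldl pvUpd PySem.Dict.empty).items =
      (pvOrd ps).map (fun s => (s, pvDep ps s, pvReq ps s)) := by
  induction ps using List.reverseRecOn with
  | nil => rfl
  | append_singleton ps x ih =>
    rw [List.foldl_append, List.foldl_cons, List.foldl_nil]
    have hstate : ps.foldl pvUpd PySem.Dict.empty =
        PySem.Dict.mk ((pvOrd ps).map (fun s => (s, pvDep ps s, pvReq ps s))) := by
      cases hd : ps.foldl pvUpd PySem.Dict.empty
      simp only [PySem.Dict.mk.injEq]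
      rw [← ih, hd]
    rw [hstate]
    unfold pvUpd
    -- the getD read
    have hget : (PySem.Dict.mk ((pvOrd ps).map (fun s => (s, pvDep ps s, pvReq ps s)))).getD x.1 ([], [])
        = (pvDep ps x.1, pvReq ps x.1) := by
      rw [getD_mk_map]
      split
      · rfl
      · next hc =>
        have hm : x.1 ∉ pvOrd ps := fun hm => hc (List.contains_iff_mem.mpr hm)
        rw [pvDep_nil hm, pvReq_nil hm]
    simp only [hget]
    -- the insert of the key entry
    set f1 : String → List String × List String :=
      fun s => (pvDep (ps ++ [x]) s, pvReq ps s) with hf1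
    have hins : ((PySem.Dict.mk ((pvOrd ps).map (fun s => (s, pvDep ps s, pvReq ps s)))).insert x.1
          (pvDep ps x.1 ++ x.2, pvReq ps x.1)).items
        = (pvAdd (pvOrd ps) x.1).map (fun s => (s, f1 s)) := by
      have hgk : f1 x.1 = (pvDep ps x.1 ++ x.2, pvReq ps x.1) := by
        simp [hf1, pvDep_append]
      have := items_insert_mk_map (pvOrd ps) (fun s => (pvDep ps s, pvReq ps s)) f1 x.1
        (fun s hs => by simp [hf1, pvDep_append]; exact fun e => absurd e.symm hs)
      rw [hgk] at this
      exact this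
    have hstruct : ((PySem.Dict.mk ((pvOrd ps).map (fun s => (s, pvDep ps s, pvReq ps s)))).insert x.1
          (pvDep ps x.1 ++ x.2, pvReq ps x.1))
        = PySem.Dict.mk ((pvAdd (pvOrd ps) x.1).map (fun s => (s, f1 s))) := by
      cases hd : (PySem.Dict.mk ((pvOrd ps).map (fun s => (s, pvDep ps s, pvReq ps s)))).insert x.1
          (pvDep ps x.1 ++ x.2, pvReq ps x.1)
      simp only [PySem.Dict.mk.injEq]
      rw [← hins, hd]
    rw [hstruct]
    -- the inner required_by loop
    rw [inner_fold x.1 x.2 (pvAdd (pvOrd ps) x.1) f1 (fun s hs => by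
      obtain ⟨h1, h2⟩ := not_mem_of_not_mem_pvAdd hs
      simp only [hf1, pvDep_append, pvDep_nil h1, pvReq_nil h1, List.nil_append, Prod.mk.injEq]
      refine ⟨?_, trivial⟩
      rw [if_neg (by simp [beq_false_of_ne (Ne.symm h2)])])]
    rw [pvOrd_append]
    apply List.map_congr_left
    intro s _
    simp [hf1, pvReq_append]

lemma stepA_eq (d : PySem.Dict String (List String × List String)) (e : String) :
    pvStepA d e = pvUpd d (pvParseB e) := rfl

-- ===== VERDICT (by name: the statement is the Claim_ definition above) =====
theorem map_service_dependencies_spec : Claim_equal_map_service_dependencies := by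
  intro config_data _ _
  unfold Spec_map_service_dependencies map_service_dependencies map_service_dependencies_alt
  rw [PySem.List.foldl_append_if
    (fun line => !(line == "") && !(PySem.Str.startswith line "#")) pvParseB]
  simp only [List.nil_append]
  have hstep : pvStepA = fun d e => pvUpd d (pvParseB e) := funext fun d => funext fun e => stepA_eq d e
  rw [hstep, ← List.foldl_map]
  rw [main_invariant, List.map_map]
  rfl
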